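-- pv_equiv track=rewrite | github.com/matthewmisiaszek/aoc_solves | AoC_2015/AoC_2015_20.py | busywork
-- ===== SOURCE A (Python) =====
-- def busywork(presents, target, endurance=None):
--     n_houses = target // presents
--     if endurance is None:
--         endurance = n_houses
--     houses = [0] * n_houses
--     for i in range(1, n_houses):
--         for j in range(i, min(n_houses, i*(endurance+1)), i):
--             houses[j] += i * presents
--     for i, house in enumerate(houses):
--         if house >= target:
--             return i
-- ===== SOURCE B (Python) =====
-- def busywork(presents, target, endurance=None):
--     n_houses = target // presents
--     if endurance is None:
--         endurance = n_houses
--     pending = {}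
--     for h in range(n_houses):
--         if h > 0 and endurance >= 1:
--             pending.setdefault(h, []).append(h)
--         total = 0
--         for i in pending.pop(h, ()):
--             total += i
--             if h // i < endurance:
--                 pending.setdefault(h + i, []).append(i)
--         if total * presents >= target:
--             return h
-- ===== Notes on version B (the rewrite author's own statement) =====
-- stated objective: alternative
-- what changed: Replaces A's global elf sieve over a preallocated houses array plus a separate final scan by a single streaming pass that keeps upcoming elf visits in a bucket dictionary keyed by their next house and returns at the first qualifying house (no array, early exit).
import Mathlib
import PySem

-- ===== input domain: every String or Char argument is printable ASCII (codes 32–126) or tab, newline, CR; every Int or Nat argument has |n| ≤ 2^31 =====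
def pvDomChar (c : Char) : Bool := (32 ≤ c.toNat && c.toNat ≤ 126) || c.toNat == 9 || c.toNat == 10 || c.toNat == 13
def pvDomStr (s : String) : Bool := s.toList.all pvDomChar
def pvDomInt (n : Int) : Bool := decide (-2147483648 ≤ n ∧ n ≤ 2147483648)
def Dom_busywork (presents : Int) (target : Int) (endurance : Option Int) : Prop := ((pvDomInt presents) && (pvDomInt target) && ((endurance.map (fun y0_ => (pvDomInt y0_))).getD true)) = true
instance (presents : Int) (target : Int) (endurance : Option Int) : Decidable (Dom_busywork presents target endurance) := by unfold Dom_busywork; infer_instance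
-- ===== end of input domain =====

-- B replaces A's global elf sieve over a preallocated array (then a separate scan) by one
-- streaming pass with a bucket dictionary of upcoming elf visits and an early return
-- (objective: alternative; same asymptotic cost, no speed claim).

-- ===== PORT A =====
-- 'for i, house in enumerate(houses): if house >= target: return i'
def busyScan (target : Int) : List Int → Int → Option Int
  | [], _ => none
  | house :: rest, i => if house ≥ target then some i else busyScan target rest (i + 1)

-- literal port of A: sieve 'houses[j] += i * presents' (all indices j satisfy 1 ≤ j < n_houses,
-- so 'j.toNat' is exact), then the first index whose value reaches target.
def busywork (presents : Int) (target : Int) (endurance : Option Int) : Option Int :=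
  let n := PySem.Int.floordiv target presents
  let e := endurance.getD n
  let houses0 : List Int := List.replicate n.toNat 0
  let houses := (PySem.List.pyRange 1 n 1).foldl (fun hs i =>
    (PySem.List.pyRange i (min n (i * (e + 1))) i).foldl (fun hs2 j =>
      hs2.set j.toNat (hs2.getD j.toNat 0 + i * presents)) hs) houses0
  busyScan target houses 0

-- ===== PORT B =====
-- literal port of Source B's house loop: 'pending.setdefault(k, []).append(i)' is
-- 'modify k [] (· ++ [i])', and 'pending.pop(h, ())' is a lookup with default plus erase.
def altLoop (presents : Int) (target : Int) (e : Int) :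
    List Int → PySem.Dict Int (List Int) → Option Int
  | [], _ => none
  | h :: rest, pending0 =>
    -- 'if h > 0 and endurance >= 1: pending.setdefault(h, []).append(h)'
    let pending1 := if 0 < h ∧ 1 ≤ e then pending0.modify h [] (fun l => l ++ [h]) else pending0
    -- 'for i in pending.pop(h, ()): total += i; if h // i < endurance: …'
    let elves := pending1.getD h []
    let pending2 := pending1.erase h
    let st := elves.foldl (fun (st : Int × PySem.Dict Int (List Int)) i =>
        (st.1 + i,
         if PySem.Int.floordiv h i < e then st.2.modify (h + i) [] (fun l => l ++ [i]) else st.2))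
      ((0 : Int), pending2)
    if st.1 * presents ≥ target then some h else altLoop presents target e rest st.2

def busywork_alt (presents : Int) (target : Int) (endurance : Option Int) : Option Int :=
  let n := PySem.Int.floordiv target presents
  let e := endurance.getD n
  altLoop presents target e (PySem.List.pyRange 0 n 1) PySem.Dict.empty

-- ===== PRECONDITION & SPEC =====
-- presents = 0 makes 'target // presents' raise ZeroDivisionError in A; everything else returns.
def Pre_busywork (presents : Int) (target : Int) (endurance : Option Int) : Prop := presents ≠ 0
instance (presents : Int) (target : Int) (endurance : Option Int) : Decidable (Pre_busywork presents target endurance) := by unfold Pre_busywork; infer_instance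
def pvWitness_busywork : Int × Int × Option Int := (2, 20, none)

def Spec_busywork (presents : Int) (target : Int) (endurance : Option Int) (out : Option Int) : Prop := out = busywork_alt presents target endurance
instance (presents : Int) (target : Int) (endurance : Option Int) (out : Option Int) : Decidable (Spec_busywork presents target endurance out) := by unfold Spec_busywork; infer_instance

-- ===== CLAIM (what is proved, stated in full; the proofs are below) =====
def Claim_equal_busywork : Prop := ∀ (presents : Int) (target : Int) (endurance : Option Int), Dom_busywork presents target endurance → Pre_busywork presents target endurance → Spec_busywork presents target endurance (busywork presents target endurance)

-- ===== LEMMAS AND PROOFS =====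

-- the weighted divisor sum both programs compute for one house (proof-side spec)
def divSum (e : Int) (h : Int) : Int :=
  (PySem.List.pyRange 1 (h + 1) 1).foldl (fun total d =>
    if PySem.Int.mod h d = 0 ∧ PySem.Int.floordiv h d ≤ e then total + d else total) 0

-- an arithmetic progression with positive step has no duplicates
theorem nodup_pyRange_pos {a b s : Int} (hs : 0 < s) : (PySem.List.pyRange a b s).Nodup := by
  rw [PySem.List.pyRange_of_pos a b hs]
  refine List.Nodup.map ?_ List.nodup_range
  intro x y hxy
  have h2 : s * (x : Int) = s * (y : Int) := by linarith
  have := mul_left_cancel₀ (ne_of_gt hs) h2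
  exact_mod_cast this

-- the inner sieve loop preserves the list's length
theorem setAdd_foldl_length (c : Int) (L : List Int) (hs : List Int) :
    (L.foldl (fun hs2 j => hs2.set j.toNat (hs2.getD j.toNat 0 + c)) hs).length = hs.length := by
  induction L generalizing hs with
  | nil => rfl
  | cons j rest ih => rw [List.foldl_cons, ih, List.length_set]

-- effect of the inner sieve loop on one cell
theorem setAdd_foldl_getD (c : Int) (L : List Int) (hL : L.Nodup) (hpos : ∀ j ∈ L, 1 ≤ j)
    (hs : List Int) (k : Nat) :
    (L.foldl (fun hs2 j => hs2.set j.toNat (hs2.getD j.toNat 0 + c)) hs).getD k 0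
      = hs.getD k 0 + (if (k : Int) ∈ L ∧ k < hs.length then c else 0) := by
  induction L generalizing hs with
  | nil => simp
  | cons j rest ih =>
    have hj1 : 1 ≤ j := hpos j (by simp)
    have hnd := List.nodup_cons.mp hL
    rw [List.foldl_cons, ih hnd.2 (fun x hx => hpos x (List.mem_cons_of_mem _ hx)), List.length_set]
    by_cases hkj : (k : Int) = j
    · have hkt : j.toNat = k := by omega
      have hkr : (k : Int) ∉ rest := hkj ▸ hnd.1
      rw [if_neg (fun hc => hkr hc.1)]
      by_cases hlen : k < hs.length
      · have hset : (hs.set j.toNat (hs.getD j.toNat 0 + c)).getD k 0 = hs.getD k 0 + c := by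
          rw [hkt]
          simp [List.getD_eq_getElem?_getD, List.getElem?_set_self hlen]
        rw [hset, if_pos ⟨by simp [hkj], hlen⟩, add_zero]
      · have hset : hs.set j.toNat (hs.getD j.toNat 0 + c) = hs := by
          apply List.set_eq_of_length_le; omega
        rw [hset, if_neg (fun hc => hlen hc.2), add_zero]
    · have hne : j.toNat ≠ k := by omega
      have hget : (hs.set j.toNat (hs.getD j.toNat 0 + c)).getD k 0 = hs.getD k 0 := by
        simp [List.getD_eq_getElem?_getD, List.getElem?_set_ne hne]
      rw [hget]
      have hiff : ((k : Int) ∈ j :: rest ∧ k < hs.length) ↔ ((k : Int) ∈ rest ∧ k < hs.length) := by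
        simp [List.mem_cons, hkj]
      simp only [hiff]

-- effect of the whole sieve on one cell: the sum of the elves' contributions
theorem sieve_getD (presents e n : Int) (I : List Int) (hI : ∀ i ∈ I, 1 ≤ i)
    (hs : List Int) (k : Nat) :
    (I.foldl (fun hs i =>
        (PySem.List.pyRange i (min n (i * (e + 1))) i).foldl (fun hs2 j =>
          hs2.set j.toNat (hs2.getD j.toNat 0 + i * presents)) hs) hs).getD k 0
      = hs.getD k 0 + (I.map (fun i =>
          if (k : Int) ∈ PySem.List.pyRange i (min n (i * (e + 1))) i ∧ k < hs.length
          then i * presents else 0)).sum := by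
  induction I generalizing hs with
  | nil => simp
  | cons i rest ih =>
    have hi1 : 1 ≤ i := hI i (by simp)
    have hipos : (0 : Int) < i := by omega
    have hmem_pos : ∀ j ∈ PySem.List.pyRange i (min n (i * (e + 1))) i, 1 ≤ j := by
      intro j hj
      have := (PySem.List.mem_pyRange_iff_of_pos hipos j).mp hj
      omega
    rw [List.foldl_cons, ih (fun x hx => hI x (List.mem_cons_of_mem _ hx))]
    rw [setAdd_foldl_getD (i * presents) _ (nodup_pyRange_pos hipos) hmem_pos]
    rw [setAdd_foldl_length]
    simp [add_assoc]

-- the sieve preserves the length of houses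
theorem sieve_length (presents e n : Int) (I : List Int) (hs : List Int) :
    (I.foldl (fun hs i =>
        (PySem.List.pyRange i (min n (i * (e + 1))) i).foldl (fun hs2 j =>
          hs2.set j.toNat (hs2.getD j.toNat 0 + i * presents)) hs) hs).length = hs.length := by
  induction I generalizing hs with
  | nil => rfl
  | cons i rest ih => rw [List.foldl_cons, ih, setAdd_foldl_length]

-- divSum as a sum over a mapped range
theorem divSum_eq_sum (e h : Int) :
    divSum e h = ((PySem.List.pyRange 1 (h + 1) 1).map (fun d =>
      if PySem.Int.mod h d = 0 ∧ PySem.Int.floordiv h d ≤ e then d else 0)).sum := by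
  unfold divSum
  have : (fun (total d : Int) =>
      if PySem.Int.mod h d = 0 ∧ PySem.Int.floordiv h d ≤ e then total + d else total)
      = (fun total d => total + (if PySem.Int.mod h d = 0 ∧ PySem.Int.floordiv h d ≤ e then d else 0)) := by
    funext total d; split <;> simp
  rw [this, PySem.List.foldl_add]
  simp

-- a mapped if-then-else sum is the sum of the filtered list
theorem sum_map_ite_eq_sum_filter (l : List Int) (p : Int → Prop) [DecidablePred p] :
    (l.map (fun d => if p d then d else 0)).sum = (l.filter (fun d => decide (p d))).sum := by
  induction l with
  | nil => rfl
  | cons a t ih => by_cases hp : p a <;> simp [hp, ih]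

-- house k's sieve total is the weighted divisor sum times presents
theorem sum_contrib (presents e n : Int) (k : Nat) (hk : (k : Int) < n) :
    ((PySem.List.pyRange 1 n 1).map (fun i =>
        if (k : Int) ∈ PySem.List.pyRange i (min n (i * (e + 1))) i
        then i * presents else 0)).sum
      = divSum e (k : Int) * presents := by
  rw [divSum_eq_sum]
  have hsplit : PySem.List.pyRange 1 n 1
      = PySem.List.pyRange 1 ((k : Int) + 1) 1 ++ PySem.List.pyRange ((k : Int) + 1) n 1 :=
    PySem.List.pyRange_one_append 1 ((k : Int) + 1) n (by omega) (by omega)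
  rw [hsplit, List.map_append, List.sum_append]
  have hzero : ((PySem.List.pyRange ((k : Int) + 1) n 1).map (fun i =>
      if (k : Int) ∈ PySem.List.pyRange i (min n (i * (e + 1))) i
      then i * presents else 0)).sum = 0 := by
    apply List.sum_eq_zero
    intro x hx
    simp only [List.mem_map] at hx
    obtain ⟨i, hi, hval⟩ := hx
    have hib := PySem.List.mem_pyRange_one.mp hi
    have : (k : Int) ∉ PySem.List.pyRange i (min n (i * (e + 1))) i := by
      intro hmem
      have := (PySem.List.mem_pyRange_iff_of_pos (by omega) _).mp hmem
      omega
    simp [this] at hval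
    omega
  rw [hzero, add_zero]
  have hcong : ∀ i ∈ PySem.List.pyRange 1 ((k : Int) + 1) 1,
      (if (k : Int) ∈ PySem.List.pyRange i (min n (i * (e + 1))) i then i * presents else 0)
        = (if PySem.Int.mod (k : Int) i = 0 ∧ PySem.Int.floordiv (k : Int) i ≤ e then i else 0) * presents := by
    intro i hi
    have hib := PySem.List.mem_pyRange_one.mp hi
    have hipos : (0 : Int) < i := by omega
    have hmem : ((k : Int) ∈ PySem.List.pyRange i (min n (i * (e + 1))) i)
        ↔ (PySem.Int.mod (k : Int) i = 0 ∧ PySem.Int.floordiv (k : Int) i ≤ e) := by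
      rw [PySem.List.mem_pyRange_iff_of_pos hipos]
      rw [PySem.Int.mod_eq_zero_iff_dvd]
      constructor
      · rintro ⟨h1, h2, h3⟩
        have hdvd : i ∣ (k : Int) := by have := dvd_add h3 (dvd_refl i); simpa using this
        refine ⟨hdvd, ?_⟩
        have : PySem.Int.floordiv (k : Int) i < e + 1 := by
          rw [PySem.Int.floordiv_lt_iff_lt_mul hipos]
          have : (k : Int) < i * (e + 1) := by omega
          linarith [this, mul_comm i (e + 1)]
        omega
      · rintro ⟨hdvd, hle⟩
        have h3 : i ∣ (k : Int) - i := dvd_sub hdvd (dvd_refl i)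
        have h1 : i ≤ (k : Int) := by
          rcases hdvd with ⟨c, hc⟩
          have hc1 : 1 ≤ c := by nlinarith
          nlinarith
        have h2 : (k : Int) < i * (e + 1) := by
          have := (PySem.Int.floordiv_lt_iff_lt_mul (a := (k : Int)) (q := e + 1) hipos).mp (by omega)
          linarith [this, mul_comm (e + 1) i]
        exact ⟨h1, by omega, h3⟩
    rw [if_congr hmem rfl rfl]
    split <;> simp
  rw [List.map_congr_left hcong]
  rw [← List.sum_map_mul_right]

-- get? after erase (PySem.Dict has no erase lemma; proved from the definition)
theorem dict_get?_erase (d : PySem.Dict Int (List Int)) (k x : Int) :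
    (d.erase k).get? x = if x = k then none else d.get? x := by
  simp only [PySem.Dict.erase, PySem.Dict.get?, List.find?_filter]
  by_cases hxk : x = k
  · subst hxk
    have hp : (fun (p : Int × List Int) => decide ((!(p.1 == x)) = true ∧ (p.1 == x) = true))
        = fun (_ : Int × List Int) => false := by
      funext p; by_cases h : p.1 = x <;> simp [h]
    rw [hp, if_pos rfl]
    simp
  · have hp : (fun (p : Int × List Int) => decide ((!(p.1 == k)) = true ∧ (p.1 == x) = true))
        = fun (p : Int × List Int) => p.1 == x := by
      funext p; by_cases h : p.1 = x <;> simp [h, hxk]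
    rw [hp, if_neg hxk]

-- getD after erase
theorem dict_getD_erase (d : PySem.Dict Int (List Int)) (k x : Int) :
    (d.erase k).getD x [] = if x = k then [] else d.getD x [] := by
  rw [PySem.Dict.getD_eq_get?_getD, dict_get?_erase, PySem.Dict.getD_eq_get?_getD]
  by_cases hxk : x = k <;> simp [hxk]

-- the per-house fold's running total is the sum of the visiting elves
theorem pair_foldl_fst (h e : Int) (L : List Int) (t0 : Int) (p : PySem.Dict Int (List Int)) :
    (L.foldl (fun (st : Int × PySem.Dict Int (List Int)) i =>
        (st.1 + i,
         if PySem.Int.floordiv h i < e then st.2.modify (h + i) [] (fun l => l ++ [i]) else st.2))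
      (t0, p)).1 = t0 + L.sum := by
  induction L generalizing t0 p with
  | nil => simp
  | cons i rest ih =>
    rw [List.foldl_cons]
    split <;> rw [ih] <;> ring_nf <;> simp [add_assoc, add_comm, add_left_comm]

-- the per-house fold's dict: each visiting elf i is re-filed under h + i when it endures
theorem pair_foldl_snd (h e : Int) (L : List Int) (hL : L.Nodup)
    (p : PySem.Dict Int (List Int))
    (hnd : ∀ x, (p.getD x []).Nodup)
    (hfresh : ∀ i ∈ L, i ∉ p.getD (h + i) []) (t0 : Int) :
    (∀ x, (((L.foldl (fun (st : Int × PySem.Dict Int (List Int)) i =>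
        (st.1 + i,
         if PySem.Int.floordiv h i < e then st.2.modify (h + i) [] (fun l => l ++ [i]) else st.2))
      (t0, p)).2).getD x []).Nodup) ∧
    (∀ x i', i' ∈ ((L.foldl (fun (st : Int × PySem.Dict Int (List Int)) i =>
        (st.1 + i,
         if PySem.Int.floordiv h i < e then st.2.modify (h + i) [] (fun l => l ++ [i]) else st.2))
      (t0, p)).2).getD x []
      ↔ i' ∈ p.getD x [] ∨ (i' ∈ L ∧ x = h + i' ∧ PySem.Int.floordiv h i' < e)) := by
  induction L generalizing p t0 with
  | nil => exact ⟨hnd, fun x i' => by simp⟩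
  | cons i rest ih =>
    have hndc := List.nodup_cons.mp hL
    rw [List.foldl_cons]
    by_cases hcond : PySem.Int.floordiv h i < e
    · rw [if_pos hcond]
      have hpnd' : ∀ x, ((p.modify (h + i) [] (fun l => l ++ [i])).getD x []).Nodup := by
        intro x
        rw [PySem.Dict.getD_modify]
        split
        · exact List.Nodup.append (hnd (h + i)) (List.nodup_singleton i)
            (List.disjoint_singleton.mpr (hfresh i (by simp)))
        · exact hnd x
      have hfresh' : ∀ j ∈ rest, j ∉ (p.modify (h + i) [] (fun l => l ++ [i])).getD (h + j) [] := by
        intro j hj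
        rw [PySem.Dict.getD_modify]
        split
        · rename_i hxe
          have hji : j = i := by omega
          exact absurd (hji ▸ hj) hndc.1
        · exact hfresh j (List.mem_cons_of_mem _ hj)
      obtain ⟨ihnd, ihmem⟩ := ih hndc.2 _ hpnd' hfresh' (t0 + i)
      refine ⟨ihnd, ?_⟩
      intro x i'
      rw [ihmem x i', PySem.Dict.getD_modify]
      by_cases hx : x = h + i
      · subst hx
        rw [if_pos rfl]
        simp only [List.mem_append, List.mem_cons]
        constructor
        · rintro ((hA | hB | hB0) | hC)
          · exact Or.inl hA
          · subst hB
            exact Or.inr ⟨Or.inl rfl, rfl, hcond⟩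
          · cases hB0
          · exact Or.inr ⟨Or.inr hC.1, hC.2.1, hC.2.2⟩
        · rintro (hA | ⟨(hE | hE), hx', hc⟩)
          · exact Or.inl (Or.inl hA)
          · exact Or.inl (Or.inr (Or.inl hE))
          · exact Or.inr ⟨hE, hx', hc⟩
      · rw [if_neg hx]
        simp only [List.mem_cons]
        constructor
        · rintro (hA | hC)
          · exact Or.inl hA
          · exact Or.inr ⟨Or.inr hC.1, hC.2.1, hC.2.2⟩
        · rintro (hA | ⟨(hE | hE), hx', hc⟩)
          · exact Or.inl hA
          · exact absurd (hE ▸ hx') hx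
          · exact Or.inr ⟨hE, hx', hc⟩
    · rw [if_neg hcond]
      obtain ⟨ihnd, ihmem⟩ := ih hndc.2 _ hnd
        (fun j hj => hfresh j (List.mem_cons_of_mem _ hj)) (t0 + i)
      refine ⟨ihnd, ?_⟩
      intro x i'
      rw [ihmem x i']
      simp only [List.mem_cons]
      constructor
      · rintro (hA | hC)
        · exact Or.inl hA
        · exact Or.inr ⟨Or.inr hC.1, hC.2.1, hC.2.2⟩
      · rintro (hA | ⟨(hE | hE), hx', hc⟩)
        · exact Or.inl hA
        · exact absurd (hE ▸ hc) hcond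
        · exact Or.inr ⟨hE, hx', hc⟩

-- B's loop invariant: pending files each live elf under its next unvisited multiple
def BInv (e h : Int) (p : PySem.Dict Int (List Int)) : Prop :=
  (∀ x : Int, (p.getD x []).Nodup) ∧
  ∀ x i : Int, i ∈ p.getD x [] ↔
    (1 ≤ i ∧ i < h ∧ i ∣ x ∧ PySem.Int.floordiv x i ≤ e ∧ x - i < h ∧ h ≤ x)

-- a Nodup list holding exactly the weighted divisors of h sums to divSum e h
theorem sum_of_char (e h : Int) (L : List Int) (hnd : L.Nodup)
    (hmem : ∀ i, i ∈ L ↔ (1 ≤ i ∧ i ≤ h ∧ i ∣ h ∧ PySem.Int.floordiv h i ≤ e)) :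
    L.sum = divSum e h := by
  rw [divSum_eq_sum, sum_map_ite_eq_sum_filter]
  apply List.Perm.sum_eq
  rw [List.perm_ext_iff_of_nodup hnd (List.Nodup.filter _ (PySem.List.nodup_pyRange_one 1 (h + 1)))]
  intro d
  rw [hmem d, List.mem_filter, PySem.List.mem_pyRange_one]
  constructor
  · rintro ⟨h1, h2, h3, h4⟩
    refine ⟨⟨h1, by omega⟩, ?_⟩
    simp [PySem.Int.mod_eq_zero_iff_dvd, h3, h4]
  · rintro ⟨⟨h1, h2⟩, hp⟩
    simp only [decide_eq_true_eq, PySem.Int.mod_eq_zero_iff_dvd] at hp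
    exact ⟨h1, by omega, hp.1, hp.2⟩

-- scanning the sieve array equals B's bucket loop under the invariant
theorem scan_eq (presents target e : Int) : ∀ (xs : List Int) (s : Int)
    (pending : PySem.Dict Int (List Int)), 0 ≤ s → BInv e s pending →
    (∀ k, k < xs.length → xs.getD k 0 = divSum e (s + (k : Int)) * presents) →
    busyScan target xs s
      = altLoop presents target e (PySem.List.pyRange s (s + xs.length) 1) pending := by
  intro xs
  induction xs with
  | nil =>
    intro s pending _ _ _
    rw [PySem.List.pyRange_one_eq_nil (by simp)]
    rfl
  | cons x rest ih =>
    intro s pending hs0 hBInv hvals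
    obtain ⟨hnd, hmem⟩ := hBInv
    -- the range unrolls to s :: …
    have hcons : PySem.List.pyRange s (s + ((rest.length : Int) + 1)) 1
        = s :: PySem.List.pyRange (s + 1) (s + ((rest.length : Int) + 1)) 1 :=
      PySem.List.pyRange_one_cons (by omega)
    simp only [List.length_cons]
    have harg : s + (((rest.length + 1 : Nat) : Int)) = s + ((rest.length : Int) + 1) := by
      omega
    rw [harg, hcons]
    -- characterize the bucket at s after the birth step
    set p1 := if 0 < s ∧ 1 ≤ e then pending.modify s [] (fun l => l ++ [s]) else pending with hp1
    have hp1getD : ∀ x : Int, p1.getD x []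
        = if x = s ∧ 0 < s ∧ 1 ≤ e then pending.getD s [] ++ [s] else pending.getD x [] := by
      intro x
      rw [hp1]
      by_cases hg : 0 < s ∧ 1 ≤ e
      · rw [if_pos hg, PySem.Dict.getD_modify]
        by_cases hx : x = s
        · rw [if_pos hx, if_pos ⟨hx, hg⟩]
        · rw [if_neg hx, if_neg (fun hc => hx hc.1)]
      · rw [if_neg hg, if_neg (fun hc => hg hc.2)]
    have hselves_mem : ∀ i : Int, i ∈ p1.getD s []
        ↔ (1 ≤ i ∧ i ≤ s ∧ i ∣ s ∧ PySem.Int.floordiv s i ≤ e) := by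
      intro i
      rw [hp1getD s]
      by_cases hg : 0 < s ∧ 1 ≤ e
      · rw [if_pos ⟨rfl, hg⟩]
        simp only [List.mem_append, List.mem_singleton]
        rw [hmem s i]
        constructor
        · rintro (⟨h1, h2, h3, h4, _, _⟩ | hi)
          · exact ⟨h1, by omega, h3, h4⟩
          · subst hi
            have : PySem.Int.floordiv i i = 1 := by
              rw [PySem.Int.floordiv_eq_ediv_of_pos (by omega)]
              exact Int.ediv_self (by omega)
            exact ⟨by omega, le_refl i, dvd_refl i, by omega⟩
        · rintro ⟨h1, h2, h3, h4⟩
          by_cases hi : i = s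
          · exact Or.inr hi
          · exact Or.inl ⟨h1, by omega, h3, h4, by omega, le_refl s⟩
      · rw [if_neg (fun hc => hg hc.2)]
        rw [hmem s i]
        constructor
        · rintro ⟨h1, h2, h3, h4, _, _⟩
          exact ⟨h1, by omega, h3, h4⟩
        · rintro ⟨h1, h2, h3, h4⟩
          exfalso
          -- 1 ≤ floordiv s i ≤ e would force the guard to hold, and i < s needs s > 0
          have hip : (0 : Int) < i := by omega
          have hfd1 : (1 : Int) ≤ PySem.Int.floordiv s i := by
            rw [PySem.Int.le_floordiv_iff_mul_le hip]
            omega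
          have he1 : (1 : Int) ≤ e := le_trans hfd1 h4
          exact hg ⟨by omega, he1⟩
    have hselves_nd : (p1.getD s []).Nodup := by
      rw [hp1getD s]
      by_cases hg : 0 < s ∧ 1 ≤ e
      · rw [if_pos ⟨rfl, hg⟩]
        refine List.Nodup.append (hnd s) (List.nodup_singleton s) ?_
        intro a ha hb
        rw [List.mem_singleton] at hb
        rw [hb] at ha
        have := (hmem s s).mp ha
        omega
      · rw [if_neg (fun hc => hg hc.2)]
        exact hnd s
    -- the bucket sum is the weighted divisor sum of s
    have hsum : (p1.getD s []).sum = divSum e s :=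
      sum_of_char e s _ hselves_nd hselves_mem
    -- properties of the dict after popping s
    have hp2nd : ∀ x, ((p1.erase s).getD x []).Nodup := by
      intro x
      rw [dict_getD_erase]
      split
      · exact List.nodup_nil
      · rw [hp1getD]
        split
        · rename_i hc
          exact absurd hc.1 (by assumption)
        · exact hnd x
    have hp2mem : ∀ x i, i ∈ (p1.erase s).getD x []
        ↔ (x ≠ s ∧ 1 ≤ i ∧ i < s ∧ i ∣ x ∧ PySem.Int.floordiv x i ≤ e ∧ x - i < s ∧ s ≤ x) := by
      intro x i
      rw [dict_getD_erase]
      by_cases hx : x = s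
      · simp [hx]
      · rw [if_neg hx, hp1getD, if_neg (fun hc => hx hc.1), hmem x i]
        constructor
        · rintro ⟨h1, h2, h3, h4, h5, h6⟩
          exact ⟨hx, h1, h2, h3, h4, h5, h6⟩
        · rintro ⟨_, h1, h2, h3, h4, h5, h6⟩
          exact ⟨h1, h2, h3, h4, h5, h6⟩
    have hfresh : ∀ i ∈ p1.getD s [], i ∉ (p1.erase s).getD (s + i) [] := by
      intro i hi hcontra
      have h1 := (hselves_mem i).mp hi
      have h2 := (hp2mem (s + i) i).mp hcontra
      omega
    obtain ⟨hq_nd, hq_mem⟩ := pair_foldl_snd s e (p1.getD s []) hselves_nd (p1.erase s)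
      hp2nd hfresh 0
    -- the new dict satisfies the invariant for s + 1
    have hBInv' : BInv e (s + 1) (((p1.getD s []).foldl (fun (st : Int × PySem.Dict Int (List Int)) i =>
        (st.1 + i,
         if PySem.Int.floordiv s i < e then st.2.modify (s + i) [] (fun l => l ++ [i]) else st.2))
      ((0 : Int), p1.erase s)).2) := by
      refine ⟨hq_nd, ?_⟩
      intro x i
      rw [hq_mem x i, hp2mem x i, hselves_mem i]
      constructor
      · rintro (⟨hxs, h1, h2, h3, h4, h5, h6⟩ | ⟨⟨h1, h2, h3, h4⟩, hx, hc⟩)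
        · refine ⟨h1, by omega, h3, h4, by omega, ?_⟩
          rcases lt_or_eq_of_le h6 with hlt | heq
          · omega
          · exact absurd heq.symm hxs
        · subst hx
          have hip : (0 : Int) < i := by omega
          have hfd : PySem.Int.floordiv (s + i) i = PySem.Int.floordiv s i + 1 := by
            rw [PySem.Int.floordiv_eq_ediv_of_pos hip, PySem.Int.floordiv_eq_ediv_of_pos hip]
            have := Int.add_mul_ediv_right s 1 (by omega : i ≠ 0)
            simpa using this
          exact ⟨h1, by omega, dvd_add h3 (dvd_refl i), by omega, by omega, by omega⟩
      · rintro ⟨h1, h2, h3, h4, h5, h6⟩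
        by_cases hdone : x - i = s
        · -- this elf was just re-filed from s
          right
          have hx : x = s + i := by omega
          have hip : (0 : Int) < i := by omega
          have hfd : PySem.Int.floordiv x i = PySem.Int.floordiv s i + 1 := by
            rw [hx, PySem.Int.floordiv_eq_ediv_of_pos hip, PySem.Int.floordiv_eq_ediv_of_pos hip]
            have := Int.add_mul_ediv_right s 1 (by omega : i ≠ 0)
            simpa using this
          have hdvdS : i ∣ s := by
            have : i ∣ x - i := dvd_sub h3 (dvd_refl i)
            rwa [hdone] at this
          refine ⟨⟨h1, by omega, hdvdS, by omega⟩, hx, by omega⟩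
        · -- this elf was already waiting at x
          left
          have hxs : x ≠ s := by
            intro hx
            subst hx
            -- i ∣ x with x < i + s ≤ x + i... i = x impossible since i ≤ x - 1? derive contradiction
            have hip : (0 : Int) < i := by omega
            -- i < x + 1 and x - i ≤ x so i ≥ 1; x - i < x + 1 means i > 0; need contradiction:
            -- i ≤ x (from i < x+1), i ∣ x, x - i ≠ x... 
            rcases h3 with ⟨c, hc⟩
            have hc1 : 1 ≤ c := by nlinarith
            rcases lt_or_eq_of_le hc1 with hc2 | hc2
            · -- c ≥ 2: x ≥ 2i, so x - i ≥ i ≥ 1, but x - i ≤ s = x and x - i < s + 1 = x + 1 ok;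
              -- need x - i < s + 1 ∧ s + 1 ≤ x: s + 1 ≤ x means x + 1 ≤ x, contradiction
              omega
            · omega
          refine ⟨hxs, h1, ?_, h3, h4, by omega, by omega⟩
          -- i < s: rule out i = s using s + 1 ≤ x, x - i < s + 1, i ∣ x
          by_contra hns
          have his : i = s := by omega
          rcases h3 with ⟨c, hc⟩
          have hip : (0 : Int) < i := by omega
          have hc2 : 2 ≤ c := by
            by_contra hcc
            have h' : i * c ≤ i := by
              have := mul_le_mul_of_nonneg_left (show c ≤ 1 by omega) (show (0 : Int) ≤ i by omega)
              simpa using this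
            omega
          have h2i : i * 2 ≤ i * c := mul_le_mul_of_nonneg_left hc2 (by omega)
          omega
    -- now compare one step of both loops
    have hx0 : x = divSum e s * presents := by
      have := hvals 0 (by simp)
      simpa using this
    rw [busyScan]
    show (if x ≥ target then some s else busyScan target rest (s + 1)) = _
    simp only [altLoop]
    rw [← hp1]
    rw [pair_foldl_fst, zero_add, hsum, hx0]
    by_cases hc : divSum e s * presents ≥ target
    · rw [if_pos hc, if_pos hc]
    · rw [if_neg hc, if_neg hc]
      have hrec := ih (s + 1) _ (by omega) hBInv' (fun k hk => by
        have := hvals (k + 1) (by simpa using Nat.succ_lt_succ hk)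
        simp only [List.getD_cons_succ] at this
        rw [this]; congr 2; omega)
      have hb : (s + 1) + (rest.length : Int) = s + ((rest.length : Int) + 1) := by omega
      rw [hb] at hrec
      exact hrec

-- ===== VERDICT (by name: the statement is the Claim_ definition above) =====
theorem busywork_spec : Claim_equal_busywork := by
  intro presents target endurance _ hpre
  unfold Spec_busywork busywork busywork_alt
  set n := PySem.Int.floordiv target presents with hn
  set e := endurance.getD n with he
  set houses0 : List Int := List.replicate n.toNat 0 with hh0
  set H := (PySem.List.pyRange 1 n 1).foldl (fun hs i =>
    (PySem.List.pyRange i (min n (i * (e + 1))) i).foldl (fun hs2 j =>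
      hs2.set j.toNat (hs2.getD j.toNat 0 + i * presents)) hs) houses0 with hH
  have hlen : H.length = n.toNat := by
    rw [hH, sieve_length]; simp [hh0]
  have hvals : ∀ k, k < H.length → H.getD k 0 = divSum e ((0 : Int) + (k : Int)) * presents := by
    intro k hk
    have hkn : k < n.toNat := by omega
    have hkInt : (k : Int) < n := by omega
    have hI : ∀ i ∈ PySem.List.pyRange 1 n 1, (1 : Int) ≤ i := by
      intro i hi; exact (PySem.List.mem_pyRange_one.mp hi).1
    rw [hH, sieve_getD presents e n _ hI]
    have h0 : houses0.getD k 0 = 0 := by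
      simp only [hh0, List.getD_eq_getElem?_getD, List.getElem?_replicate]
      split <;> rfl
    have hlen0 : houses0.length = n.toNat := by simp [hh0]
    have hmapeq : (PySem.List.pyRange 1 n 1).map (fun i =>
        if (k : Int) ∈ PySem.List.pyRange i (min n (i * (e + 1))) i ∧ k < houses0.length
        then i * presents else 0)
        = (PySem.List.pyRange 1 n 1).map (fun i =>
        if (k : Int) ∈ PySem.List.pyRange i (min n (i * (e + 1))) i
        then i * presents else 0) := by
      apply List.map_congr_left
      intro i _
      have : ((k : Int) ∈ PySem.List.pyRange i (min n (i * (e + 1))) i ∧ k < houses0.length)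
          ↔ ((k : Int) ∈ PySem.List.pyRange i (min n (i * (e + 1))) i) := by
        rw [hlen0]; exact and_iff_left hkn
      rw [if_congr this rfl rfl]
    rw [h0, hmapeq, sum_contrib presents e n k hkInt]
    norm_num
  have hBInv0 : BInv e 0 PySem.Dict.empty := by
    constructor
    · intro x; rw [PySem.Dict.getD_empty]; exact List.nodup_nil
    · intro x i
      rw [PySem.Dict.getD_empty]
      simp only [List.not_mem_nil, false_iff]
      omega
  have hscan := scan_eq presents target e H 0 PySem.Dict.empty (le_refl 0) hBInv0 hvals
  have hrange : PySem.List.pyRange 0 ((0 : Int) + (H.length : Int)) 1 = PySem.List.pyRange 0 n 1 := by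
    rw [hlen]
    by_cases hn0 : 0 ≤ n
    · congr 1; omega
    · rw [PySem.List.pyRange_one_eq_nil (by omega), PySem.List.pyRange_one_eq_nil (by omega)]
  rw [hrange] at hscan
  show busyScan target H 0 = altLoop presents target e (PySem.List.pyRange 0 n 1) PySem.Dict.empty
  exact hscan
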